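-- pv_equiv track=rewrite | github.com/ccx06/Dual-Prompt-Tuning-for-HTC | src/models/model_utils.py | get_all_path_set
-- ===== SOURCE A (Python) =====
-- def get_all_path_set(depth2label, value2slot):
--     """ Retrieve all existing paths in the tag tree, including incomplete paths that do not require running from root to leaf node (This is the difference from the `get_path_set` function in the upper level directory of utils.py). """
--     path_set = []
--
--     depth = len(depth2label)
--
--     for i in range(1, depth):
--         for node in depth2label[i]:
--             cur = set()
--             cur.add(node)
--             parent = value2slot.get(node, -1)
--             while parent != -1:
--                 cur.add(parent)
--                 parent = value2slot.get(parent, -1)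
--             path_set.append(cur)
--     return path_set
-- ===== SOURCE B (Python) =====
-- def get_all_path_set(depth2label, value2slot):
--     """Memoized tree recurrence: each node's ancestor-path set is {node} | memo[parent],
--     so every parent chain is walked once instead of once per descendant."""
--     memo = {}
--
--     def path(node):
--         s = memo.get(node)
--         if s is None:
--             parent = value2slot.get(node, -1)
--             s = {node} if parent == -1 else {node} | path(parent)
--             memo[node] = s
--         return s
--
--     path_set = []
--     for i in range(1, len(depth2label)):
--         for node in depth2label[i]:
--             path_set.append(set(path(node)))
--     return path_set
-- ===== Notes on version B (the rewrite author's own statement) =====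
-- stated objective: faster
-- what changed: Replaces the per-node upward while-loop with a memoized recurrence memo[node] = {node} | memo[parent], so each parent chain is computed once and shared; the outer iteration order and appended sets are unchanged.
import Mathlib
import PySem

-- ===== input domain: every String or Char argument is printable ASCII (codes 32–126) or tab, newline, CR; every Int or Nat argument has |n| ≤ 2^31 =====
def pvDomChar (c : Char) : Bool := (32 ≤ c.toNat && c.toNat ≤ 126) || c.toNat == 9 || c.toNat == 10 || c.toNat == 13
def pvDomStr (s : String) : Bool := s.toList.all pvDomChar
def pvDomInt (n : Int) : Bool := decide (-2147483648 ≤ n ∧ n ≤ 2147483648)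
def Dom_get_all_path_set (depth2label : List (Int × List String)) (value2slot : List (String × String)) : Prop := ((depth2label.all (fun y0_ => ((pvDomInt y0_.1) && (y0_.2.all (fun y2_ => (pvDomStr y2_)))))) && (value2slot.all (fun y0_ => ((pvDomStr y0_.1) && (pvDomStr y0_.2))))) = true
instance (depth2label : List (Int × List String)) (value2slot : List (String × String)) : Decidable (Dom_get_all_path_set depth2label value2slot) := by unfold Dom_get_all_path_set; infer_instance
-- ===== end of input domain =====

-- B replaces A's per-node upward while-loop by a memoized recurrence {node} | memo[parent] (faster: each chain walked once).

-- ===== PORT A =====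
-- the 'while parent != -1' loop; fuel value2slot.length+1 merely totalises it (under Pre_ every chain ends within it)
def pvChainA (value2slot : List (String × String)) : Nat → Option String → PySem.Set String → PySem.Set String
  | _, none, cur => cur
  | 0, some _, cur => cur
  | n+1, some p, cur =>
      pvChainA value2slot n ((PySem.Dict.mk value2slot).get? p) (PySem.Set.add cur p)

def get_all_path_set (depth2label : List (Int × List String)) (value2slot : List (String × String)) : List (List String) :=
  let depth : Int := depth2label.length
  (PySem.List.pyRange 1 depth 1).foldl (fun path_set i =>
    (((PySem.Dict.mk depth2label).get? i).getD []).foldl (fun path_set node =>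
      let cur : PySem.Set String := PySem.Set.add PySem.Set.empty node
      let parent := (PySem.Dict.mk value2slot).get? node
      path_set ++ [pvChainA value2slot (value2slot.length + 1) parent cur]) path_set) []

-- ===== PORT B =====
-- memoized path(node); fuel value2slot.length+1 totalises the recursion (sufficient under Pre_)
def pvPathB (value2slot : List (String × String)) :
    Nat → String → PySem.Dict String (List String) → (List String × PySem.Dict String (List String))
  | fuel, node, memo =>
    match memo.get? node with
    | some s => (s, memo)
    | none =>
      match (PySem.Dict.mk value2slot).get? node, fuel with
      | none, _ =>
          let s : List String := PySem.Set.add PySem.Set.empty node   -- {node}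
          (s, memo.insert node s)
      | some _, 0 => ([node], memo)   -- fuel exhausted; unreachable under Pre_
      | some p, n+1 =>
          let r := pvPathB value2slot n p memo
          let s : List String := r.1.foldl PySem.Set.add (PySem.Set.add PySem.Set.empty node)  -- {node} | path(parent)
          (s, r.2.insert node s)

def get_all_path_set_alt (depth2label : List (Int × List String)) (value2slot : List (String × String)) : List (List String) :=
  let depth : Int := depth2label.length
  ((PySem.List.pyRange 1 depth 1).foldl
    (fun (acc : List (List String) × PySem.Dict String (List String)) i =>
      (((PySem.Dict.mk depth2label).get? i).getD []).foldl (fun acc node =>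
        let r := pvPathB value2slot (value2slot.length + 1) node acc.2
        (acc.1 ++ [r.1], r.2)) acc)
    ([], PySem.Dict.empty)).1

-- ===== PRECONDITION & SPEC =====
-- one step of the parent map (none once the chain has ended)
def pvParent (value2slot : List (String × String)) (o : Option String) : Option String :=
  o.bind (fun k => (PySem.Dict.mk value2slot).get? k)

-- Pre_ excludes exactly the inputs on which Python A does not return: a depth i in 1..len-1 missing from
-- depth2label (KeyError), and a parent chain from a visited label that never ends (A's while loop diverges);
-- chain-freeness of cycles is stated in closed form: the (length+1)-fold parent map sends every visited label to none.
def Pre_get_all_path_set (depth2label : List (Int × List String)) (value2slot : List (String × String)) : Prop :=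
  (∀ i ∈ PySem.List.pyRange 1 (depth2label.length : Int) 1, ((PySem.Dict.mk depth2label).get? i).isSome) ∧
  (∀ i ∈ PySem.List.pyRange 1 (depth2label.length : Int) 1,
    ∀ node ∈ ((PySem.Dict.mk depth2label).get? i).getD [],
      (pvParent value2slot)^[value2slot.length + 1] (some node) = none)
instance (depth2label : List (Int × List String)) (value2slot : List (String × String)) : Decidable (Pre_get_all_path_set depth2label value2slot) := by unfold Pre_get_all_path_set; infer_instance

def pvWitness_get_all_path_set : (List (Int × List String)) × (List (String × String)) :=
  ([(0, ["r"]), (1, ["a", "b"]), (2, ["c"])], [("a", "r"), ("b", "r"), ("c", "a")])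

def Spec_get_all_path_set (depth2label : List (Int × List String)) (value2slot : List (String × String)) (out : List (List String)) : Prop := out = get_all_path_set_alt depth2label value2slot
instance (depth2label : List (Int × List String)) (value2slot : List (String × String)) (out : List (List String)) : Decidable (Spec_get_all_path_set depth2label value2slot out) := by unfold Spec_get_all_path_set; infer_instance

-- ===== CLAIM (what is proved, stated in full; the proofs are below) =====
def Claim_equal_get_all_path_set : Prop := ∀ (depth2label : List (Int × List String)) (value2slot : List (String × String)), Dom_get_all_path_set depth2label value2slot → Pre_get_all_path_set depth2label value2slot → Spec_get_all_path_set depth2label value2slot (get_all_path_set depth2label value2slot)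

-- ===== LEMMAS AND PROOFS =====

-- bounded iteration of the parent map, in the recursive form the proofs use
def pvIter (value2slot : List (String × String)) : Nat → Option String → Bool
  | _, none => true
  | 0, some _ => false
  | n+1, some k => pvIter value2slot n ((PySem.Dict.mk value2slot).get? k)

theorem pvIter_iff_iterate (v2s : List (String × String)) :
    ∀ (n : Nat) (o : Option String), pvIter v2s n o = true ↔ (pvParent v2s)^[n] o = none := by
  intro n
  induction n with
  | zero => intro o; cases o <;> simp [pvIter, Function.iterate_zero]
  | succ n ih =>
      intro o
      cases o with
      | none =>
          constructor
          · intro _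
            rw [Function.iterate_succ_apply, show pvParent v2s none = none from rfl]
            exact (ih none).mp (by cases n <;> rfl)
          · intro _
            cases n <;> rfl
      | some k =>
          rw [Function.iterate_succ_apply,
            show pvParent v2s (some k) = (PySem.Dict.mk v2s).get? k from rfl]
          exact ih _

-- raw chain of parents read off from o, with fuel
def pvRaw (value2slot : List (String × String)) : Nat → Option String → List String
  | _, none => []
  | 0, some _ => []
  | n+1, some p => p :: pvRaw value2slot n ((PySem.Dict.mk value2slot).get? p)

-- the canonical per-node set both ports produce
def pvCanon (value2slot : List (String × String)) (node : String) : List String :=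
  (pvRaw value2slot (value2slot.length + 1) ((PySem.Dict.mk value2slot).get? node)).foldl
    PySem.Set.add (PySem.Set.add PySem.Set.empty node)

theorem pvIter_some (v2s : List (String × String)) (n : Nat) (k : String) :
    pvIter v2s (n+1) (some k) = pvIter v2s n ((PySem.Dict.mk v2s).get? k) := rfl

theorem pvChainA_eq_foldl (v2s : List (String × String)) :
    ∀ (n : Nat) (o : Option String) (cur : PySem.Set String),
      pvChainA v2s n o cur = (pvRaw v2s n o).foldl PySem.Set.add cur := by
  intro n
  induction n with
  | zero => intro o cur; cases o <;> simp [pvChainA, pvRaw]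
  | succ n ih => intro o cur; cases o <;> simp [pvChainA, pvRaw, ih]

theorem pvIter_succ (v2s : List (String × String)) :
    ∀ (n : Nat) (o : Option String), pvIter v2s n o = true → pvIter v2s (n+1) o = true := by
  intro n
  induction n with
  | zero => intro o h; cases o <;> simp_all [pvIter]
  | succ n ih => intro o h; cases o <;> simp_all [pvIter]

theorem pvIter_mono (v2s : List (String × String)) {n m : Nat} (hnm : n ≤ m) :
    ∀ (o : Option String), pvIter v2s n o = true → pvIter v2s m o = true := by
  induction m with
  | zero => intro o h; have h0 : n = 0 := Nat.le_zero.mp hnm; subst h0; exact h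
  | succ m ih =>
      intro o h
      rcases Nat.lt_or_ge n (m+1) with h1 | h1
      · exact pvIter_succ v2s m o (ih (Nat.lt_succ_iff.mp h1) o h)
      · have h2 : n = m + 1 := Nat.le_antisymm hnm h1
        subst h2; exact h

theorem pvRaw_succ (v2s : List (String × String)) :
    ∀ (n : Nat) (o : Option String), pvIter v2s n o = true →
      pvRaw v2s (n+1) o = pvRaw v2s n o := by
  intro n
  induction n with
  | zero => intro o h; cases o <;> simp_all [pvIter, pvRaw]
  | succ n ih => intro o h; cases o <;> simp_all [pvIter, pvRaw]

theorem pvRaw_mono (v2s : List (String × String)) {n m : Nat} (hnm : n ≤ m) (o : Option String)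
    (h : pvIter v2s n o = true) : pvRaw v2s m o = pvRaw v2s n o := by
  induction m with
  | zero => have h0 : n = 0 := Nat.le_zero.mp hnm; subst h0; rfl
  | succ m ih =>
      rcases Nat.lt_or_ge n (m+1) with h1 | h1
      · have hm : n ≤ m := Nat.lt_succ_iff.mp h1
        rw [pvRaw_succ v2s m o (pvIter_mono v2s hm o h), ih hm]
      · have h2 : n = m + 1 := Nat.le_antisymm hnm h1
        subst h2; rfl

theorem pvMem_foldl_add_base (x : String) :
    ∀ (t : List String) (s : PySem.Set String), x ∈ s → x ∈ t.foldl PySem.Set.add s := by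
  intro t
  induction t with
  | nil => intro s h; simpa using h
  | cons y t ih =>
      intro s h
      exact ih (PySem.Set.add s y) (by simp [PySem.Set.mem_add, h])

theorem pvMem_foldl_add_of_mem (x : String) :
    ∀ (t : List String) (s : PySem.Set String), x ∈ t → x ∈ t.foldl PySem.Set.add s := by
  intro t
  induction t with
  | nil => intro s h; simp at h
  | cons y t ih =>
      intro s h
      rcases List.mem_cons.mp h with h | h
      · subst h
        exact pvMem_foldl_add_base x t (PySem.Set.add s x) (by simp [PySem.Set.mem_add])
      · exact ih (PySem.Set.add s y) h

theorem pvFoldl_add_add (s t : PySem.Set String) (x : String) :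
    List.foldl PySem.Set.add s (PySem.Set.add t x) = PySem.Set.add (List.foldl PySem.Set.add s t) x := by
  by_cases hx : x ∈ t
  · rw [PySem.Set.add_of_mem hx, PySem.Set.add_of_mem (pvMem_foldl_add_of_mem x t s hx)]
  · rw [PySem.Set.add_of_not_mem hx, List.foldl_append]
    rfl

-- adding an already-deduplicated union adds the underlying sequence: the key algebraic fact
theorem pvFoldl_add_assoc :
    ∀ (q : List String) (s t : PySem.Set String),
      List.foldl PySem.Set.add s (List.foldl PySem.Set.add t q)
        = List.foldl PySem.Set.add (List.foldl PySem.Set.add s t) q := by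
  intro q
  induction q with
  | nil => intro s t; rfl
  | cons x q ih =>
      intro s t
      show List.foldl PySem.Set.add s (List.foldl PySem.Set.add (PySem.Set.add t x) q)
        = List.foldl PySem.Set.add (PySem.Set.add (List.foldl PySem.Set.add s t) x) q
      rw [ih s (PySem.Set.add t x), pvFoldl_add_add]

-- memo invariant: every memo entry is the node's canonical path set
def pvInv (v2s : List (String × String)) (memo : PySem.Dict String (List String)) : Prop :=
  ∀ k s, memo.get? k = some s → s = pvCanon v2s k

theorem pvInv_empty (v2s : List (String × String)) : pvInv v2s PySem.Dict.empty := by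
  intro k s h; simp [PySem.Dict.get?_empty] at h

theorem pvInv_insert (v2s : List (String × String)) (memo : PySem.Dict String (List String))
    (hInv : pvInv v2s memo) (node : String) (s : List String) (hs : s = pvCanon v2s node) :
    pvInv v2s (memo.insert node s) := by
  intro k t h
  rw [PySem.Dict.get?_insert] at h
  by_cases hk : k = node
  · rw [if_pos hk] at h
    cases h; subst hk; exact hs
  · exact hInv k t (by simpa [hk] using h)

theorem pvRaw_none (v2s : List (String × String)) (n : Nat) : pvRaw v2s n none = [] := by
  cases n <;> rfl

theorem pvRaw_some (v2s : List (String × String)) (n : Nat) (p : String) :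
    pvRaw v2s (n+1) (some p) = p :: pvRaw v2s n ((PySem.Dict.mk v2s).get? p) := rfl

theorem pvCanon_of_none (v2s : List (String × String)) (node : String)
    (hg : (PySem.Dict.mk v2s).get? node = none) :
    pvCanon v2s node = PySem.Set.add PySem.Set.empty node := by
  rw [pvCanon, hg, pvRaw_none]; rfl

theorem pvCanon_of_some (v2s : List (String × String)) (node p : String)
    (hp : pvIter v2s v2s.length ((PySem.Dict.mk v2s).get? p) = true)
    (hg : (PySem.Dict.mk v2s).get? node = some p) :
    pvCanon v2s node
      = List.foldl PySem.Set.add (PySem.Set.add (PySem.Set.add PySem.Set.empty node) p)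
          (pvRaw v2s (v2s.length + 1) ((PySem.Dict.mk v2s).get? p)) := by
  rw [pvCanon, hg, pvRaw_some]
  rw [pvRaw_mono v2s (Nat.le_succ _) _ hp]
  rfl

theorem pvPathB_spec (v2s : List (String × String)) :
    ∀ (fuel : Nat), fuel ≤ v2s.length + 1 → ∀ (node : String) (memo : PySem.Dict String (List String)),
      pvIter v2s (fuel + 1) (some node) = true → pvInv v2s memo →
      (pvPathB v2s fuel node memo).1 = pvCanon v2s node ∧ pvInv v2s (pvPathB v2s fuel node memo).2 := by
  intro fuel
  induction fuel with
  | zero =>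
      intro _ node memo hIt hInv
      rcases Option.eq_none_or_eq_some (memo.get? node) with hm | ⟨s, hm⟩
      · rcases Option.eq_none_or_eq_some ((PySem.Dict.mk v2s).get? node) with hg | ⟨p, hg⟩
        · rw [pvPathB.eq_def]; simp only [hm, hg]
          exact ⟨(pvCanon_of_none v2s node hg).symm,
            pvInv_insert v2s memo hInv node _ (pvCanon_of_none v2s node hg).symm⟩
        · rw [pvIter_some, hg] at hIt
          simp [pvIter] at hIt
      · rw [pvPathB.eq_def]; simp only [hm]
        exact ⟨hInv node s hm, hInv⟩
  | succ n ih =>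
      intro hle node memo hIt hInv
      have hnK : n ≤ v2s.length := Nat.lt_succ_iff.mp (Nat.lt_of_lt_of_le (Nat.lt_succ_self n) hle)
      rcases Option.eq_none_or_eq_some (memo.get? node) with hm | ⟨s, hm⟩
      · rcases Option.eq_none_or_eq_some ((PySem.Dict.mk v2s).get? node) with hg | ⟨p, hg⟩
        · rw [pvPathB.eq_def]; simp only [hm, hg]
          exact ⟨(pvCanon_of_none v2s node hg).symm,
            pvInv_insert v2s memo hInv node _ (pvCanon_of_none v2s node hg).symm⟩
        · rw [pvIter_some, hg] at hIt
          obtain ⟨hv, hi⟩ := ih (Nat.le_of_succ_le hle) p memo hIt hInv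
          have hp : pvIter v2s v2s.length ((PySem.Dict.mk v2s).get? p) = true := by
            rw [pvIter_some] at hIt
            exact pvIter_mono v2s hnK _ hIt
          have hval : List.foldl PySem.Set.add (PySem.Set.add PySem.Set.empty node)
              (pvPathB v2s n p memo).1 = pvCanon v2s node := by
            rw [hv, pvCanon, pvFoldl_add_assoc, pvCanon_of_some v2s node p hp hg]
            rfl
          rw [pvPathB.eq_def]; simp only [hm, hg]
          exact ⟨hval, pvInv_insert v2s _ hi node _ hval⟩
      · rw [pvPathB.eq_def]; simp only [hm]
        exact ⟨hInv node s hm, hInv⟩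

theorem pvInner (v2s : List (String × String)) :
    ∀ (nodes : List String),
      (∀ node ∈ nodes, pvIter v2s (v2s.length + 1) (some node) = true) →
      ∀ (accA : List (List String))
      (accB : List (List String) × PySem.Dict String (List String)),
      accB.1 = accA → pvInv v2s accB.2 →
      (nodes.foldl (fun acc node =>
          (acc.1 ++ [(pvPathB v2s (v2s.length + 1) node acc.2).1],
           (pvPathB v2s (v2s.length + 1) node acc.2).2)) accB).1
        = nodes.foldl (fun ps node => ps ++ [pvCanon v2s node]) accA ∧
      pvInv v2s (nodes.foldl (fun acc node =>
          (acc.1 ++ [(pvPathB v2s (v2s.length + 1) node acc.2).1],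
           (pvPathB v2s (v2s.length + 1) node acc.2).2)) accB).2 := by
  intro nodes
  induction nodes with
  | nil => intro _ accA accB h1 h2; exact ⟨h1, h2⟩
  | cons node nodes ih =>
      intro hN accA accB h1 h2
      have hIt : pvIter v2s (v2s.length + 1 + 1) (some node) = true :=
        pvIter_succ v2s _ _ (hN node (List.mem_cons_self))
      obtain ⟨hv, hi⟩ :=
        pvPathB_spec v2s (v2s.length + 1) (Nat.le_refl _) node accB.2 hIt h2
      exact ih (fun x hx => hN x (List.mem_cons_of_mem _ hx))
        (accA ++ [pvCanon v2s node]) _ (by simp [h1, hv]) hi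

theorem pvOuter (v2s : List (String × String)) (d2l : List (Int × List String)) :
    ∀ (Is : List Int),
      (∀ i ∈ Is, ∀ node ∈ ((PySem.Dict.mk d2l).get? i).getD [],
        pvIter v2s (v2s.length + 1) (some node) = true) →
      ∀ (accA : List (List String))
      (accB : List (List String) × PySem.Dict String (List String)),
      accB.1 = accA → pvInv v2s accB.2 →
      (Is.foldl (fun acc i =>
          (((PySem.Dict.mk d2l).get? i).getD []).foldl (fun acc node =>
            (acc.1 ++ [(pvPathB v2s (v2s.length + 1) node acc.2).1],
             (pvPathB v2s (v2s.length + 1) node acc.2).2)) acc) accB).1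
        = Is.foldl (fun ps i =>
            (((PySem.Dict.mk d2l).get? i).getD []).foldl
              (fun ps node => ps ++ [pvCanon v2s node]) ps) accA ∧
      pvInv v2s (Is.foldl (fun acc i =>
          (((PySem.Dict.mk d2l).get? i).getD []).foldl (fun acc node =>
            (acc.1 ++ [(pvPathB v2s (v2s.length + 1) node acc.2).1],
             (pvPathB v2s (v2s.length + 1) node acc.2).2)) acc) accB).2 := by
  intro Is
  induction Is with
  | nil => intro _ accA accB h1 h2; exact ⟨h1, h2⟩
  | cons i Is ih =>
      intro hN accA accB h1 h2
      obtain ⟨hv, hi⟩ := pvInner v2s (((PySem.Dict.mk d2l).get? i).getD [])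
        (hN i (List.mem_cons_self)) accA accB h1 h2
      exact ih (fun j hj => hN j (List.mem_cons_of_mem _ hj)) _ _ hv hi

-- ===== VERDICT (by name: the statement is the Claim_ definition above) =====
theorem get_all_path_set_spec : Claim_equal_get_all_path_set := by
  intro d2l v2s _ hPre
  have hN : ∀ i ∈ PySem.List.pyRange 1 (d2l.length : Int) 1,
      ∀ node ∈ ((PySem.Dict.mk d2l).get? i).getD [],
        pvIter v2s (v2s.length + 1) (some node) = true :=
    fun i hi node hn => (pvIter_iff_iterate v2s _ _).mpr (hPre.2 i hi node hn)
  unfold Spec_get_all_path_set get_all_path_set get_all_path_set_alt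
  rw [(pvOuter v2s d2l (PySem.List.pyRange 1 (d2l.length : Int) 1) hN [] ([], PySem.Dict.empty)
        rfl (pvInv_empty v2s)).1]
  simp only [pvChainA_eq_foldl, pvCanon]
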